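-- pv_equiv track=rewrite | github.com/JacobAraujo/Beecrwnd | Problems/Contest3/Fishing.py | max_fish_in_net
-- ===== SOURCE A (Python) =====
-- import itertools
--
-- def max_fish_in_net(s, fish_coordinates):
--     max_fish = 0
--
--     for r in range(1, len(fish_coordinates) + 1):
--         for combination in itertools.combinations(fish_coordinates, r):
--             x_min = min(x for x, _ in combination)
--             x_max = max(x for x, _ in combination)
--             y_min = min(y for _, y in combination)
--             y_max = max(y for _, y in combination)
--
--             if x_max - x_min <= s and y_max - y_min <= s:
--                 captured_fish = sum(1 for x, y in fish_coordinates if x_min <= x <= x_max and y_min <= y <= y_max)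
--                 max_fish = max(max_fish, captured_fish)
--
--     return max_fish
-- ===== SOURCE B (Python) =====
-- def max_fish_in_net(s, fish_coordinates):
--     best = 0
--     for px, _ in fish_coordinates:
--         for _, qy in fish_coordinates:
--             best = max(best, sum(1 for x, y in fish_coordinates
--                                  if px <= x <= px + s and qy <= y <= qy + s))
--     return best
-- ===== Notes on version B (the rewrite author's own statement) =====
-- stated objective: faster
-- what changed: Replace the exponential enumeration of all nonempty subsets (itertools.combinations for every size) by enumerating only candidate net positions anchored at a fish's x-coordinate and a fish's y-coordinate and counting fish inside each s-by-s window.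
import Mathlib
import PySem

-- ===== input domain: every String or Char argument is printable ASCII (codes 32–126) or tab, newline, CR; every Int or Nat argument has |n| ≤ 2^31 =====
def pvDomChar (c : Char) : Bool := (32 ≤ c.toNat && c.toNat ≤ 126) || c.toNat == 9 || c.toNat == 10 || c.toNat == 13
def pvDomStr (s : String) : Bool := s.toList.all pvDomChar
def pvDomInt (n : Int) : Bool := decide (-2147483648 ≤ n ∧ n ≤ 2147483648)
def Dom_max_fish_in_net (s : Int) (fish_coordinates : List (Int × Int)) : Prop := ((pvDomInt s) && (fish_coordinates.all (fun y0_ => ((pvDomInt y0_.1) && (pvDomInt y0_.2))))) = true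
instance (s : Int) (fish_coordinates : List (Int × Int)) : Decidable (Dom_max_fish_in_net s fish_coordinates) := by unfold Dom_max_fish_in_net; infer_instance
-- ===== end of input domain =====

-- B replaces A's exponential enumeration of all nonempty subsets by enumerating fish-anchored s×s window positions; objective: faster (asymptotic).

-- ===== PORT A =====
-- body of A's inner loop over `combination` (the `min`/`max` over a nonempty combination never
-- raises in Python, so the wildcard branch is unreachable)
def pvAStep (s : Int) (fish_coordinates : List (Int × Int)) (max_fish : Int)
    (combination : List (Int × Int)) : Int :=
  match PySem.List.min? (combination.map Prod.fst) (fun x => x),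
        PySem.List.max? (combination.map Prod.fst) (fun x => x),
        PySem.List.min? (combination.map Prod.snd) (fun y => y),
        PySem.List.max? (combination.map Prod.snd) (fun y => y) with
  | some x_min, some x_max, some y_min, some y_max =>
    if x_max - x_min ≤ s ∧ y_max - y_min ≤ s then
      max max_fish ((fish_coordinates.filter (fun p =>
        decide (x_min ≤ p.1 ∧ p.1 ≤ x_max ∧ y_min ≤ p.2 ∧ p.2 ≤ y_max))).length : Int)
    else max_fish
  | _, _, _, _ => max_fish

def max_fish_in_net (s : Int) (fish_coordinates : List (Int × Int)) : Int :=
  (PySem.List.pyRange 1 ((fish_coordinates.length : Int) + 1) 1).foldl (fun max_fish r =>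
    (PySem.List.combinations fish_coordinates r.toNat).foldl
      (pvAStep s fish_coordinates) max_fish) 0

-- ===== PORT B =====
def max_fish_in_net_alt (s : Int) (fish_coordinates : List (Int × Int)) : Int :=
  fish_coordinates.foldl (fun best p =>
    fish_coordinates.foldl (fun best q =>
      max best ((fish_coordinates.filter (fun r =>
        decide (p.1 ≤ r.1 ∧ r.1 ≤ p.1 + s ∧ q.2 ≤ r.2 ∧ r.2 ≤ q.2 + s))).length : Int)) best) 0

-- ===== PRECONDITION & SPEC =====
def Spec_max_fish_in_net (s : Int) (fish_coordinates : List (Int × Int)) (out : Int) : Prop := out = max_fish_in_net_alt s fish_coordinates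
instance (s : Int) (fish_coordinates : List (Int × Int)) (out : Int) : Decidable (Spec_max_fish_in_net s fish_coordinates out) := by unfold Spec_max_fish_in_net; infer_instance

-- ===== CLAIM (what is proved, stated in full; the proofs are below) =====
def Claim_equal_max_fish_in_net : Prop := ∀ (s : Int) (fish_coordinates : List (Int × Int)), Dom_max_fish_in_net s fish_coordinates → Spec_max_fish_in_net s fish_coordinates (max_fish_in_net s fish_coordinates)

-- ===== LEMMAS AND PROOFS =====

-- generic lemmas about accumulating folds over Int
theorem pv_foldl_step_le {α : Type} (step : Int → α → Int) (hs : ∀ a x, a ≤ step a x) :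
    ∀ (xs : List α) (init : Int), init ≤ xs.foldl step init := by
  intro xs
  induction xs with
  | nil => intro init; simp
  | cons y ys ih =>
    intro init
    exact le_trans (hs init y) (ih (step init y))

theorem pv_foldl_step_upper {α : Type} (step : Int → α → Int) (xs : List α) (c : Int)
    (h : ∀ a x, x ∈ xs → a ≤ c → step a x ≤ c) :
    ∀ init, init ≤ c → xs.foldl step init ≤ c := by
  induction xs with
  | nil => intro init hi; simpa using hi
  | cons y ys ih =>
    intro init hi
    simp only [List.foldl_cons]
    exact ih (fun a x hx ha => h a x (List.mem_cons_of_mem _ hx) ha) _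
      (h init y (List.mem_cons_self) hi)

theorem pv_foldl_step_elem {α : Type} (step : Int → α → Int) (hs : ∀ a x, a ≤ step a x)
    (xs : List α) (x : α) (hx : x ∈ xs) (w : Int) (hw : ∀ a, w ≤ step a x) :
    ∀ init, w ≤ xs.foldl step init := by
  induction xs with
  | nil => cases hx
  | cons y ys ih =>
    intro init
    simp only [List.foldl_cons]
    rcases List.mem_cons.mp hx with h | h
    · subst h
      exact le_trans (hw init) (pv_foldl_step_le step hs ys (step init x))
    · exact ih h _

theorem pv_length_filter_mono {α : Type} (l : List α) (p q : α → Bool)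
    (h : ∀ x ∈ l, p x = true → q x = true) :
    (l.filter p).length ≤ (l.filter q).length := by
  induction l with
  | nil => simp
  | cons y ys ih =>
    have ih' := ih (fun x hx => h x (List.mem_cons_of_mem _ hx))
    by_cases hp : p y = true
    · have hq := h y List.mem_cons_self hp
      simp [hp, hq]
      omega
    · simp only [List.filter_cons]
      by_cases hq : q y = true <;> simp [hp, hq] <;> omega

-- extrema of a nonempty Int list exist
theorem pv_min_some (z : Int) (t : List Int) :
    ∃ m, PySem.List.min? (z :: t) (fun x => x) = some m :=
  ⟨t.foldl min z, PySem.List.min?_id_cons z t⟩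

theorem pv_max_some (z : Int) (t : List Int) :
    ∃ m, PySem.List.max? (z :: t) (fun x => x) = some m :=
  ⟨t.foldl max z, PySem.List.max?_id_cons z t⟩

-- B's result grows along the folds and dominates every fish-anchored rectangle count
theorem pvB_inner_hs (s : Int) (fish : List (Int × Int)) (p : Int × Int) :
    ∀ (a : Int) (q : Int × Int), a ≤
      max a ((fish.filter (fun r =>
        decide (p.1 ≤ r.1 ∧ r.1 ≤ p.1 + s ∧ q.2 ≤ r.2 ∧ r.2 ≤ q.2 + s))).length : Int) :=
  fun a _ => le_max_left _ _

theorem pvB_ge_rect (s : Int) (fish : List (Int × Int)) (p q : Int × Int)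
    (hp : p ∈ fish) (hq : q ∈ fish) :
    ((fish.filter (fun r =>
        decide (p.1 ≤ r.1 ∧ r.1 ≤ p.1 + s ∧ q.2 ≤ r.2 ∧ r.2 ≤ q.2 + s))).length : Int)
      ≤ max_fish_in_net_alt s fish := by
  unfold max_fish_in_net_alt
  refine pv_foldl_step_elem _ ?_ _ p hp _ ?_ 0
  · intro a x
    exact pv_foldl_step_le _ (pvB_inner_hs s fish x) fish a
  · intro a
    refine pv_foldl_step_elem _ (pvB_inner_hs s fish p) _ q hq _ ?_ a
    intro b
    exact le_max_right _ _

theorem pvB_nonneg (s : Int) (fish : List (Int × Int)) : 0 ≤ max_fish_in_net_alt s fish := by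
  unfold max_fish_in_net_alt
  apply pv_foldl_step_le
  intro a x
  exact pv_foldl_step_le _ (pvB_inner_hs s fish x) fish a

-- A's accumulator step only grows
theorem pvA_hs (s : Int) (fish : List (Int × Int)) :
    ∀ (a : Int) (c : List (Int × Int)), a ≤ pvAStep s fish a c := by
  intro a c
  unfold pvAStep
  rcases PySem.List.min? (c.map Prod.fst) (fun x => x) with _ | x_min <;>
  rcases PySem.List.max? (c.map Prod.fst) (fun x => x) with _ | x_max <;>
  rcases PySem.List.min? (c.map Prod.snd) (fun y => y) with _ | y_min <;>
  rcases PySem.List.max? (c.map Prod.snd) (fun y => y) with _ | y_max <;>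
  simp only [le_refl] <;> split
  · exact le_max_left _ _
  · exact le_refl a

theorem pvA_nonneg (s : Int) (fish : List (Int × Int)) : 0 ≤ max_fish_in_net s fish := by
  unfold max_fish_in_net
  apply pv_foldl_step_le
  intro a r
  exact pv_foldl_step_le _ (pvA_hs s fish) _ a

-- each valid combination's captured count is at most B's result
theorem pvA_cand_le_B (s : Int) (fish : List (Int × Int)) (c : List (Int × Int))
    (hsub : c.Sublist fish)
    (x_min x_max y_min y_max : Int)
    (h1 : PySem.List.min? (c.map Prod.fst) (fun x => x) = some x_min)
    (h3 : PySem.List.min? (c.map Prod.snd) (fun y => y) = some y_min)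
    (hcond : x_max - x_min ≤ s ∧ y_max - y_min ≤ s) :
    ((fish.filter (fun p =>
        decide (x_min ≤ p.1 ∧ p.1 ≤ x_max ∧ y_min ≤ p.2 ∧ p.2 ≤ y_max))).length : Int)
      ≤ max_fish_in_net_alt s fish := by
  -- a fish p attaining x_min and a fish q attaining y_min
  obtain ⟨px, hpx_mem, hpx⟩ := List.mem_map.mp (PySem.List.min?_mem h1)
  obtain ⟨qy, hqy_mem, hqy⟩ := List.mem_map.mp (PySem.List.min?_mem h3)
  have hpf : px ∈ fish := hsub.mem hpx_mem
  have hqf : qy ∈ fish := hsub.mem hqy_mem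
  have hmono := pv_length_filter_mono fish
    (fun p => decide (x_min ≤ p.1 ∧ p.1 ≤ x_max ∧ y_min ≤ p.2 ∧ p.2 ≤ y_max))
    (fun r => decide (px.1 ≤ r.1 ∧ r.1 ≤ px.1 + s ∧ qy.2 ≤ r.2 ∧ r.2 ≤ qy.2 + s))
    (by
      intro x hx h
      simp only [decide_eq_true_eq] at h ⊢
      omega)
  have hB := pvB_ge_rect s fish px qy hpf hqf
  omega

-- each fish-anchored rectangle's count is at most A's result
theorem pvB_cand_le_A (s : Int) (fish : List (Int × Int)) (p q : Int × Int)
    (hp : p ∈ fish) (hq : q ∈ fish) :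
    ((fish.filter (fun r =>
        decide (p.1 ≤ r.1 ∧ r.1 ≤ p.1 + s ∧ q.2 ≤ r.2 ∧ r.2 ≤ q.2 + s))).length : Int)
      ≤ max_fish_in_net s fish := by
  obtain ⟨S, hS⟩ : ∃ S, fish.filter (fun r =>
      decide (p.1 ≤ r.1 ∧ r.1 ≤ p.1 + s ∧ q.2 ≤ r.2 ∧ r.2 ≤ q.2 + s)) = S := ⟨_, rfl⟩
  rw [hS]
  rcases S with _ | ⟨z, S'⟩
  · simpa using pvA_nonneg s fish
  · -- S = z :: S' is nonempty: it is one of the combinations A enumerates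
    have hsub : (z :: S').Sublist fish := by rw [← hS]; exact List.filter_sublist
    have hSmem : ∀ r ∈ z :: S',
        (decide (p.1 ≤ r.1 ∧ r.1 ≤ p.1 + s ∧ q.2 ≤ r.2 ∧ r.2 ≤ q.2 + s)) = true := by
      intro r hr
      rw [← hS] at hr
      exact (List.mem_filter.mp hr).2
    obtain ⟨x_min, h1⟩ := pv_min_some z.1 (S'.map Prod.fst)
    obtain ⟨x_max, h2⟩ := pv_max_some z.1 (S'.map Prod.fst)
    obtain ⟨y_min, h3⟩ := pv_min_some z.2 (S'.map Prod.snd)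
    obtain ⟨y_max, h4⟩ := pv_max_some z.2 (S'.map Prod.snd)
    rw [show z.1 :: S'.map Prod.fst = (z :: S').map Prod.fst from rfl] at h1 h2
    rw [show z.2 :: S'.map Prod.snd = (z :: S').map Prod.snd from rfl] at h3 h4
    -- the extrema are coordinates of fish inside the rectangle
    obtain ⟨e1, he1_mem, he1⟩ := List.mem_map.mp (PySem.List.min?_mem h1)
    obtain ⟨e2, he2_mem, he2⟩ := List.mem_map.mp (PySem.List.max?_mem h2)
    obtain ⟨e3, he3_mem, he3⟩ := List.mem_map.mp (PySem.List.min?_mem h3)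
    obtain ⟨e4, he4_mem, he4⟩ := List.mem_map.mp (PySem.List.max?_mem h4)
    have hb1 := hSmem e1 he1_mem; have hb2 := hSmem e2 he2_mem
    have hb3 := hSmem e3 he3_mem; have hb4 := hSmem e4 he4_mem
    simp only [decide_eq_true_eq] at hb1 hb2 hb3 hb4
    have hx1 : p.1 ≤ x_min := by rw [← he1]; exact hb1.1
    have hx2 : x_max ≤ p.1 + s := by rw [← he2]; exact hb2.2.1
    have hy1 : q.2 ≤ y_min := by rw [← he3]; exact hb3.2.2.1
    have hy2 : y_max ≤ q.2 + s := by rw [← he4]; exact hb4.2.2.2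
    have hcond : x_max - x_min ≤ s ∧ y_max - y_min ≤ s := by omega
    -- the bounding-box filter of S picks out exactly the fish of the rectangle
    have hfilter_eq : fish.filter (fun r =>
        decide (x_min ≤ r.1 ∧ r.1 ≤ x_max ∧ y_min ≤ r.2 ∧ r.2 ≤ y_max)) = z :: S' := by
      rw [← hS]
      apply List.filter_congr
      intro r hr
      simp only [decide_eq_decide]
      constructor
      · intro h
        refine ⟨?_, ?_, ?_, ?_⟩ <;> omega
      · intro h
        have hrS : r ∈ z :: S' := by
          rw [← hS]
          exact List.mem_filter.mpr ⟨hr, by simp only [decide_eq_true_eq]; exact h⟩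
        have l1 := PySem.List.min?_isMin h1 r.1 (List.mem_map_of_mem hrS)
        have l2 := PySem.List.max?_isMax h2 r.1 (List.mem_map_of_mem hrS)
        have l3 := PySem.List.min?_isMin h3 r.2 (List.mem_map_of_mem hrS)
        have l4 := PySem.List.max?_isMax h4 r.2 (List.mem_map_of_mem hrS)
        simp only at l1 l2 l3 l4
        exact ⟨l1, l2, l3, l4⟩
    -- A's step at combination S yields at least S.length
    have hstep : ∀ a : Int, ((z :: S').length : Int) ≤ pvAStep s fish a (z :: S') := by
      intro a
      unfold pvAStep
      rw [h1, h2, h3, h4]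
      simp only [hcond, and_self, if_true, hfilter_eq]
      exact le_max_right _ _
    -- S is enumerated by A: its size is in the range, S among the combinations of that size
    have hlen_le : (z :: S').length ≤ fish.length := hsub.length_le
    have hr_mem : (((z :: S').length : Int)) ∈
        PySem.List.pyRange 1 ((fish.length : Int) + 1) 1 := by
      rw [PySem.List.mem_pyRange_one]
      constructor
      · exact_mod_cast Nat.succ_le_of_lt (Nat.pos_of_ne_zero (by simp))
      · exact_mod_cast Nat.lt_succ_of_le hlen_le
    have hc_mem : (z :: S') ∈
        PySem.List.combinations fish (((z :: S').length : Int)).toNat := by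
      rw [PySem.List.mem_combinations_iff]
      exact ⟨hsub, by simp⟩
    unfold max_fish_in_net
    refine pv_foldl_step_elem _ ?_ _ _ hr_mem _ ?_ 0
    · intro a r
      exact pv_foldl_step_le _ (pvA_hs s fish) _ a
    · intro a
      exact pv_foldl_step_elem _ (pvA_hs s fish) _ _ hc_mem _ hstep a

theorem pvA_le_B (s : Int) (fish : List (Int × Int)) :
    max_fish_in_net s fish ≤ max_fish_in_net_alt s fish := by
  unfold max_fish_in_net
  apply pv_foldl_step_upper _ _ _ _ 0 (pvB_nonneg s fish)
  intro a r _ ha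
  apply pv_foldl_step_upper _ _ _ _ a ha
  intro b c hc hb
  unfold pvAStep
  rcases h1 : PySem.List.min? (c.map Prod.fst) (fun x => x) with _ | x_min <;>
  rcases h2 : PySem.List.max? (c.map Prod.fst) (fun x => x) with _ | x_max <;>
  rcases h3 : PySem.List.min? (c.map Prod.snd) (fun y => y) with _ | y_min <;>
  rcases h4 : PySem.List.max? (c.map Prod.snd) (fun y => y) with _ | y_max <;>
  simp only <;> try exact hb
  split
  · rename_i hcond
    have hsub := ((PySem.List.mem_combinations_iff _ _ _).mp hc).1
    have := pvA_cand_le_B s fish c hsub x_min x_max y_min y_max h1 h3 hcond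
    exact max_le hb this
  · exact hb

theorem pvB_le_A (s : Int) (fish : List (Int × Int)) :
    max_fish_in_net_alt s fish ≤ max_fish_in_net s fish := by
  unfold max_fish_in_net_alt
  apply pv_foldl_step_upper _ _ _ _ 0 (pvA_nonneg s fish)
  intro a p hp ha
  apply pv_foldl_step_upper _ _ _ _ a ha
  intro b q hq hb
  exact max_le hb (pvB_cand_le_A s fish p q hp hq)

-- ===== VERDICT (by name: the statement is the Claim_ definition above) =====
theorem max_fish_in_net_spec : Claim_equal_max_fish_in_net := by
  intro s fish _
  unfold Spec_max_fish_in_net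
  exact le_antisymm (pvA_le_B s fish) (pvB_le_A s fish)
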